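-- pv_equiv track=rewrite | github.com/seamus52/leetcode | 2391-minimum_amount_of_time_to_collect_garbage-1st_draft.py | garbageCollection
-- ===== SOURCE A (Python) =====
-- from typing import List
--
-- def garbageCollection(garbage: List[str], travel: List[int]) -> int:
--     travel = [0] + travel
--     acc = 0
--     m = {}
--     g = {}
--     p = {}
--     for i, house in enumerate(garbage):
--         l = list(house)
--         if "M" in l:
--             m[i] = l.count("M")
--         if "G" in l:
--             g[i] = l.count("G")
--         if "P" in l:
--             p[i] = l.count("P")
--
--     if m:
--         acc += sum(travel[:max(m.keys()) + 1])
--     for i, units in m.items():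
--         acc += units
--
--     if g:
--         acc += sum(travel[:max(g.keys()) + 1])
--     for i, units in g.items():
--         acc += units
--
--     if p:
--         acc += sum(travel[:max(p.keys()) + 1])
--     for i, units in p.items():
--         acc += units
--
--     return acc
-- ===== SOURCE B (Python) =====
-- from typing import List
--
-- def garbageCollection(garbage: List[str], travel: List[int]) -> int:
--     cum = total = lm = lg = lp = 0
--     for i, house in enumerate(garbage):
--         for ch in house:
--             if ch == 'M':
--                 total += 1
--                 lm = cum
--             elif ch == 'G':
--                 total += 1
--                 lg = cum
--             elif ch == 'P':
--                 total += 1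
--                 lp = cum
--         if i < len(travel):
--             cum += travel[i]
--     return total + lm + lg + lp
-- ===== Notes on version B (the rewrite author's own statement) =====
-- stated objective: alternative
-- what changed: Single fused forward pass over houses and their characters keeping a running cumulative travel cost and the last-seen travel cost per garbage type, instead of A's three per-type index dicts with max(keys) and three slice-sums afterwards.
import Mathlib
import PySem

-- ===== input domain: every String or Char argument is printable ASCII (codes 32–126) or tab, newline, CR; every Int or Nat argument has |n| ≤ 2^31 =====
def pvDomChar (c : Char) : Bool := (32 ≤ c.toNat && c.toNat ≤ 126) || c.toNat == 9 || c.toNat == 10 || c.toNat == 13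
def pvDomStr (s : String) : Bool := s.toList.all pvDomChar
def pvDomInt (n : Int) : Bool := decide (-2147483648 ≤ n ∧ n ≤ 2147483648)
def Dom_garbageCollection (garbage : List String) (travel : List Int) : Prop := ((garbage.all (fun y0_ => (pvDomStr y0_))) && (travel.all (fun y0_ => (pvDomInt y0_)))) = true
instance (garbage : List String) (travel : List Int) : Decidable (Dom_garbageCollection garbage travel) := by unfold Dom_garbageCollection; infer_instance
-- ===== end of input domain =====

-- B replaces A's three per-type index dicts, max(keys) and slice-sums by one fused forward
-- pass with a running cumulative travel cost and a last-seen cost per garbage type (objective: alternative).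

-- ===== PORT A =====
-- body of A's 'for i, house in enumerate(garbage)' loop: conditional insert into the three dicts
def gcStep (st : PySem.Dict Int Int × PySem.Dict Int Int × PySem.Dict Int Int)
    (ih : Int × String) : PySem.Dict Int Int × PySem.Dict Int Int × PySem.Dict Int Int :=
  let l := ih.2.toList                                   -- l = list(house)
  let m := if l.contains 'M' then st.1.insert ih.1 ((l.count 'M' : Nat) : Int) else st.1
  let g := if l.contains 'G' then st.2.1.insert ih.1 ((l.count 'G' : Nat) : Int) else st.2.1
  let p := if l.contains 'P' then st.2.2.insert ih.1 ((l.count 'P' : Nat) : Int) else st.2.2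
  (m, g, p)

def garbageCollection (garbage : List String) (travel : List Int) : Int :=
  let travel := (0 : Int) :: travel                      -- travel = [0] + travel
  let acc : Int := 0
  let mgp := (PySem.List.enumerate garbage).foldl gcStep (PySem.Dict.empty, PySem.Dict.empty, PySem.Dict.empty)
  let m := mgp.1
  let g := mgp.2.1
  let p := mgp.2.2
  -- if m: acc += sum(travel[:max(m.keys()) + 1]);  for i, units in m.items(): acc += units
  let acc := if m.items.isEmpty then acc else
    acc + (PySem.List.slice travel none (some (((PySem.List.max? m.keys (fun x => x)).getD 0) + 1))).sum
  let acc := m.items.foldl (fun a iu => a + iu.2) acc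
  let acc := if g.items.isEmpty then acc else
    acc + (PySem.List.slice travel none (some (((PySem.List.max? g.keys (fun x => x)).getD 0) + 1))).sum
  let acc := g.items.foldl (fun a iu => a + iu.2) acc
  let acc := if p.items.isEmpty then acc else
    acc + (PySem.List.slice travel none (some (((PySem.List.max? p.keys (fun x => x)).getD 0) + 1))).sum
  let acc := p.items.foldl (fun a iu => a + iu.2) acc
  acc

-- ===== PORT B =====
-- body of B's 'for ch in house' loop; state is (total, lm, lg, lp)
def gcHouse (cum : Int) (st : Int × Int × Int × Int) (ch : Char) : Int × Int × Int × Int :=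
  if ch = 'M' then (st.1 + 1, cum, st.2.2.1, st.2.2.2)
  else if ch = 'G' then (st.1 + 1, st.2.1, cum, st.2.2.2)
  else if ch = 'P' then (st.1 + 1, st.2.1, st.2.2.1, cum)
  else st

-- B's outer 'for i, house in enumerate(garbage)' loop
def gcLoop (houses : List String) (i : Nat) (cum total lm lg lp : Int) (travel : List Int) : Int :=
  match houses with
  | [] => total + lm + lg + lp
  | h :: rest =>
    let st := h.toList.foldl (gcHouse cum) (total, lm, lg, lp)
    let cum' := if i < travel.length then cum + travel.getD i 0 else cum   -- if i < len(travel): cum += travel[i]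
    gcLoop rest (i + 1) cum' st.1 st.2.1 st.2.2.1 st.2.2.2 travel

def garbageCollection_alt (garbage : List String) (travel : List Int) : Int :=
  gcLoop garbage 0 0 0 0 0 0 travel

-- ===== PRECONDITION & SPEC =====
def Spec_garbageCollection (garbage : List String) (travel : List Int) (out : Int) : Prop := out = garbageCollection_alt garbage travel
instance (garbage : List String) (travel : List Int) (out : Int) : Decidable (Spec_garbageCollection garbage travel out) := by unfold Spec_garbageCollection; infer_instance

-- ===== CLAIM (what is proved, stated in full; the proofs are below) =====
def Claim_equal_garbageCollection : Prop := ∀ (garbage : List String) (travel : List Int), Dom_garbageCollection garbage travel → Spec_garbageCollection garbage travel (garbageCollection garbage travel)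

-- ===== LEMMAS AND PROOFS =====

-- number of occurrences of type t in house h, as a Python int
def cnt (t : Char) (h : String) : Int := ((h.toList.count t : Nat) : Int)

def sumCnt (t : Char) (g : List String) : Int := (g.map (cnt t)).sum

-- index of the last house containing type t
def lastIdx? (t : Char) : List String → Option Nat
  | [] => none
  | h :: r =>
    match lastIdx? t r with
    | some j => some (j + 1)
    | none => if t ∈ h.toList then some 0 else none

-- cumulative travel cost to reach house i
def T (travel : List Int) (i : Nat) : Int := (travel.take i).sum

-- travel cost attributed to type t: the cost of its last house, else the carried value l
def lastVal (travel : List Int) (i : Nat) (l : Int) (t : Char) (g : List String) : Int :=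
  match lastIdx? t g with
  | none => l
  | some j => T travel (i + j)

-- the items A's fold accumulates for type t, starting at enumerate index s
def occI (t : Char) : Int → List String → List (Int × Int)
  | _, [] => []
  | s, h :: r => (if t ∈ h.toList then [(s, cnt t h)] else []) ++ occI t (s + 1) r

theorem T_succ (travel : List Int) (i : Nat) :
    T travel (i + 1) = if i < travel.length then T travel i + travel.getD i 0 else T travel i := by
  unfold T
  rw [List.take_add_one]
  by_cases h : i < travel.length
  · simp [h, List.getD, List.getElem?_eq_getElem h]
  · have hle : travel.length ≤ i := by omega
    simp [h, List.getElem?_eq_none_iff.mpr hle, List.take_of_length_le hle,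
      List.take_of_length_le (Nat.le_succ_of_le hle)]

theorem house_fold (cum : Int) (cs : List Char) :
    ∀ (total lm lg lp : Int),
    cs.foldl (gcHouse cum) (total, lm, lg, lp) =
      (total + ((cs.count 'M' : Nat) : Int) + ((cs.count 'G' : Nat) : Int) + ((cs.count 'P' : Nat) : Int),
       if 'M' ∈ cs then cum else lm,
       if 'G' ∈ cs then cum else lg,
       if 'P' ∈ cs then cum else lp) := by
  induction cs with
  | nil => intro total lm lg lp; simp
  | cons c cs ih =>
    intro total lm lg lp
    simp only [List.foldl_cons, gcHouse]
    by_cases hM : c = 'M'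
    · rw [if_pos hM, ih]
      subst hM
      simp only [List.count_cons, List.mem_cons, Prod.mk.injEq]
      refine ⟨by push_cast; simp; ring, by simp, ?_, ?_⟩ <;> simp
    · rw [if_neg hM]
      by_cases hG : c = 'G'
      · rw [if_pos hG, ih]
        subst hG
        simp only [List.count_cons, List.mem_cons, Prod.mk.injEq]
        refine ⟨by push_cast; simp [Ne.symm hM]; ring, ?_, by simp, ?_⟩ <;> simp [Ne.symm hM]
      · rw [if_neg hG]
        by_cases hP : c = 'P'
        · rw [if_pos hP, ih]
          subst hP
          simp only [List.count_cons, List.mem_cons, Prod.mk.injEq]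
          refine ⟨by push_cast; simp [Ne.symm hM, Ne.symm hG]; ring, ?_, ?_, by simp⟩ <;>
            simp [Ne.symm hM, Ne.symm hG]
        · rw [if_neg hP, ih]
          simp only [List.count_cons, List.mem_cons, Prod.mk.injEq]
          refine ⟨by push_cast; simp [hM, hG, hP], ?_, ?_, ?_⟩ <;>
            simp [Ne.symm hM, Ne.symm hG, Ne.symm hP]

theorem lastVal_cons (travel : List Int) (i : Nat) (l l' : Int) (t : Char) (h : String) (r : List String)
    (hl' : l' = if t ∈ h.toList then T travel i else l) :
    lastVal travel (i + 1) l' t r = lastVal travel i l t (h :: r) := by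
  have hcons : lastIdx? t (h :: r) =
      (match lastIdx? t r with
       | some j => some (j + 1)
       | none => if t ∈ h.toList then some 0 else none) := rfl
  unfold lastVal
  cases hr : lastIdx? t r with
  | some j => rw [hcons, hr]; simp [show i + 1 + j = i + (j + 1) by omega]
  | none =>
    rw [hcons, hr]
    by_cases hm : t ∈ h.toList <;> simp [hm, hl']

theorem gcLoop_spec (rest : List String) :
    ∀ (i : Nat) (total lm lg lp : Int) (travel : List Int),
    gcLoop rest i (T travel i) total lm lg lp travel =
      total + sumCnt 'M' rest + sumCnt 'G' rest + sumCnt 'P' rest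
        + lastVal travel i lm 'M' rest + lastVal travel i lg 'G' rest + lastVal travel i lp 'P' rest := by
  induction rest with
  | nil => intro i total lm lg lp travel; simp [gcLoop, sumCnt, lastVal, lastIdx?]
  | cons h r ih =>
    intro i total lm lg lp travel
    rw [gcLoop]
    simp only [house_fold]
    rw [show (if i < travel.length then T travel i + travel.getD i 0 else T travel i) = T travel (i+1)
        from (T_succ travel i).symm]
    rw [ih]
    rw [lastVal_cons travel i lm _ 'M' h r rfl, lastVal_cons travel i lg _ 'G' h r rfl,
        lastVal_cons travel i lp _ 'P' h r rfl]
    simp only [sumCnt, List.map_cons, List.sum_cons, cnt]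
    ring

-- fresh-key insert during A's loop: all existing keys are below the running enumerate index
theorem insert_below (d : PySem.Dict Int Int) (s : Int) (v : Int)
    (hb : ∀ k ∈ d.keys, k < s) :
    (d.insert s v).items = d.items ++ [(s, v)] := by
  apply PySem.Dict.items_insert_of_not_contains
  by_contra hc
  have : d.contains s = true := by revert hc; cases d.contains s <;> simp
  exact absurd (hb s ((PySem.Dict.contains_iff_mem_keys d s).mp this)) (lt_irrefl s)

theorem foldA (rest : List String) :
    ∀ (s : Int) (m g p : PySem.Dict Int Int),
    (∀ k ∈ m.keys, k < s) → (∀ k ∈ g.keys, k < s) → (∀ k ∈ p.keys, k < s) →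
    ((PySem.List.enumerate rest s).foldl gcStep (m, g, p)).1.items = m.items ++ occI 'M' s rest ∧
    ((PySem.List.enumerate rest s).foldl gcStep (m, g, p)).2.1.items = g.items ++ occI 'G' s rest ∧
    ((PySem.List.enumerate rest s).foldl gcStep (m, g, p)).2.2.items = p.items ++ occI 'P' s rest := by
  induction rest with
  | nil => intro s m g p _ _ _; simp [PySem.List.enumerate_nil, occI]
  | cons h r ih =>
    intro s m g p hm hg hp
    rw [PySem.List.enumerate_cons]
    simp only [List.foldl_cons]
    have hstep : gcStep (m, g, p) (s, h) =
        ((if h.toList.contains 'M' then m.insert s ((h.toList.count 'M' : Nat) : Int) else m),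
         (if h.toList.contains 'G' then g.insert s ((h.toList.count 'G' : Nat) : Int) else g),
         (if h.toList.contains 'P' then p.insert s ((h.toList.count 'P' : Nat) : Int) else p)) := rfl
    rw [hstep]
    have key1 : ∀ (d : PySem.Dict Int Int) (t : Char), (∀ k ∈ d.keys, k < s) →
        (∀ k ∈ (if h.toList.contains t then d.insert s ((h.toList.count t : Nat) : Int) else d).keys, k < s + 1) := by
      intro d t hb k hk
      by_cases hc : h.toList.contains t
      · rw [if_pos hc] at hk
        rcases (PySem.Dict.mem_keys_insert _ _ _ _).mp hk with h1 | h2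
        · omega
        · exact lt_trans (hb k h2) (by omega)
      · rw [if_neg hc] at hk; exact lt_trans (hb k hk) (by omega)
    have items1 : ∀ (d : PySem.Dict Int Int) (t : Char), (∀ k ∈ d.keys, k < s) →
        (if h.toList.contains t then d.insert s ((h.toList.count t : Nat) : Int) else d).items
          = d.items ++ (if t ∈ h.toList then [(s, cnt t h)] else []) := by
      intro d t hb
      by_cases hc : t ∈ h.toList
      · rw [if_pos ((List.contains_iff_mem).mpr hc), if_pos hc, insert_below d s _ hb]; rfl
      · rw [if_neg (by simpa [List.contains_iff_mem] using hc), if_neg hc, List.append_nil]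
    obtain ⟨e1, e2, e3⟩ := ih (s + 1) _ _ _ (key1 m 'M' hm) (key1 g 'G' hg) (key1 p 'P' hp)
    refine ⟨?_, ?_, ?_⟩
    · rw [e1, items1 m 'M' hm, occI, List.append_assoc]
    · rw [e2, items1 g 'G' hg, occI, List.append_assoc]
    · rw [e3, items1 p 'P' hp, occI, List.append_assoc]

theorem occI_vals (t : Char) (rest : List String) :
    ∀ s : Int, ((occI t s rest).map (·.2)).sum = sumCnt t rest := by
  induction rest with
  | nil => intro s; simp [occI, sumCnt]
  | cons h r ih =>
    intro s
    rw [occI]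
    by_cases hm : t ∈ h.toList
    · simp [hm, ih, sumCnt]
    · have h0 : cnt t h = 0 := by simp [cnt, List.count_eq_zero.mpr hm]
      simp [hm, ih, sumCnt, h0]

theorem foldl_max_pull (l : List Int) : ∀ a b : Int, l.foldl max (max a b) = max a (l.foldl max b) := by
  induction l with
  | nil => intro a b; simp
  | cons c l ih => intro a b; simp only [List.foldl_cons, max_assoc, ih]

theorem foldl_max_of_max? (l : List Int) (M a : Int)
    (h : PySem.List.max? l (fun y => y) = some M) : l.foldl max a = max a M := by
  cases l with
  | nil => simp [PySem.List.max?] at h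
  | cons x t =>
    rw [PySem.List.max?_id_cons] at h
    obtain rfl : t.foldl max x = M := by injection h
    show t.foldl max (max a x) = max a (t.foldl max x)
    exact foldl_max_pull t a x

theorem occI_keys_max (t : Char) (rest : List String) :
    ∀ s : Int, PySem.List.max? ((occI t s rest).map (·.1)) (fun x => x)
      = (lastIdx? t rest).map (fun j => s + (j : Int)) := by
  induction rest with
  | nil => intro s; simp [occI, lastIdx?, PySem.List.max?]
  | cons h r ih =>
    intro s
    have hcons : lastIdx? t (h :: r) =
        (match lastIdx? t r with
         | some j => some (j + 1)
         | none => if t ∈ h.toList then some 0 else none) := rfl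
    rw [occI, hcons]
    by_cases hm : t ∈ h.toList
    · simp only [hm, if_pos, List.singleton_append, List.map_cons]
      rw [PySem.List.max?_id_cons]
      cases hr : lastIdx? t r with
      | none =>
        have : (occI t (s + 1) r).map (·.1) = [] := by
          have := ih (s + 1)
          rw [hr] at this
          exact (PySem.List.max?_eq_none_iff ((occI t (s+1) r).map (·.1)) (fun x : Int => x)).mp (by simpa using this)
        rw [this]
        simp
      | some j =>
        have hmax := ih (s + 1)
        rw [hr] at hmax
        rw [foldl_max_of_max? _ _ _ (by simpa using hmax)]
        simp only [Option.map_some]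
        congr 1
        have : s ≤ s + 1 + (j : Int) := by omega
        push_cast
        omega
    · simp only [hm, if_neg, List.nil_append, ite_false]
      rw [ih (s + 1)]
      cases hr : lastIdx? t r with
      | none => simp
      | some j => simp; push_cast; omega

theorem foldl_add_snd (l : List (Int × Int)) : ∀ a : Int,
    l.foldl (fun x iu => x + iu.2) a = a + (l.map (·.2)).sum := by
  induction l with
  | nil => intro a; simp
  | cons x l ih => intro a; simp [ih]; ring

theorem ite_acc (c : Prop) [Decidable c] (a x : Int) :
    (if c then a else a + x) = a + (if c then 0 else x) := by
  split_ifs <;> ring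

theorem trav_term (t : Char) (g : List String) (travel : List Int) :
    (if (occI t 0 g).isEmpty then (0:Int)
     else (PySem.List.slice ((0:Int) :: travel) none
       (some ((PySem.List.max? ((occI t 0 g).map (·.1)) (fun x => x)).getD 0 + 1))).sum)
    = lastVal travel 0 0 t g := by
  have hmax := occI_keys_max t g 0
  unfold lastVal
  cases hr : lastIdx? t g with
  | none =>
    rw [hr] at hmax
    have : occI t 0 g = [] :=
      List.map_eq_nil_iff.mp ((PySem.List.max?_eq_none_iff ((occI t 0 g).map (·.1)) (fun x : Int => x)).mp (by simpa using hmax))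
    simp [this]
  | some j =>
    rw [hr] at hmax
    simp only [Option.pure_def, Option.bind_eq_bind, Option.bind_some, Option.map_some, zero_add] at hmax
    have hne : occI t 0 g ≠ [] := by
      intro he
      rw [he] at hmax
      simp [PySem.List.max?] at hmax
    rw [if_neg (by simpa [List.isEmpty_iff] using hne), hmax]
    simp only [Option.pure_def, Option.bind_eq_bind, Option.bind_some, Option.map_some, Option.getD_some]
    have hb : (j : Int) + 1 = ((j + 1 : Nat) : Int) := by push_cast; ring
    rw [hb, PySem.List.slice_to_natCast]
    show (((0:Int) :: travel).take (j+1)).sum = T travel (0 + j)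
    simp [T]

theorem A_eq (garbage : List String) (travel : List Int) :
    garbageCollection garbage travel =
      sumCnt 'M' garbage + sumCnt 'G' garbage + sumCnt 'P' garbage
        + lastVal travel 0 0 'M' garbage + lastVal travel 0 0 'G' garbage + lastVal travel 0 0 'P' garbage := by
  obtain ⟨e1, e2, e3⟩ := foldA garbage 0 PySem.Dict.empty PySem.Dict.empty PySem.Dict.empty
    (by simp [PySem.Dict.keys_empty]) (by simp [PySem.Dict.keys_empty]) (by simp [PySem.Dict.keys_empty])
  simp only [show (PySem.Dict.empty : PySem.Dict Int Int).items = [] from rfl, List.nil_append] at e1 e2 e3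
  have hk1 : ((PySem.List.enumerate garbage).foldl gcStep (PySem.Dict.empty, PySem.Dict.empty, PySem.Dict.empty)).1.keys
      = ((PySem.List.enumerate garbage).foldl gcStep (PySem.Dict.empty, PySem.Dict.empty, PySem.Dict.empty)).1.items.map (·.1) := rfl
  have hk2 : ((PySem.List.enumerate garbage).foldl gcStep (PySem.Dict.empty, PySem.Dict.empty, PySem.Dict.empty)).2.1.keys
      = ((PySem.List.enumerate garbage).foldl gcStep (PySem.Dict.empty, PySem.Dict.empty, PySem.Dict.empty)).2.1.items.map (·.1) := rfl
  have hk3 : ((PySem.List.enumerate garbage).foldl gcStep (PySem.Dict.empty, PySem.Dict.empty, PySem.Dict.empty)).2.2.keys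
      = ((PySem.List.enumerate garbage).foldl gcStep (PySem.Dict.empty, PySem.Dict.empty, PySem.Dict.empty)).2.2.items.map (·.1) := rfl
  unfold garbageCollection
  simp only [hk1, hk2, hk3, e1, e2, e3, foldl_add_snd, ite_acc, occI_vals]
  rw [trav_term 'M' garbage travel, trav_term 'G' garbage travel, trav_term 'P' garbage travel]
  ring

theorem main_eq (garbage : List String) (travel : List Int) :
    garbageCollection garbage travel = garbageCollection_alt garbage travel := by
  rw [A_eq]
  unfold garbageCollection_alt
  have h0 : (0 : Int) = T travel 0 := by simp [T]
  rw [h0, gcLoop_spec]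
  simp only [show T travel 0 = 0 from by simp [T]]
  ring

-- ===== VERDICT (by name: the statement is the Claim_ definition above) =====
theorem garbageCollection_spec : Claim_equal_garbageCollection := by
  intro garbage travel _
  show garbageCollection garbage travel = garbageCollection_alt garbage travel
  exact main_eq garbage travel
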